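-- pv_equiv track=rewrite | github.com/amiretefaghi/CaMuViD | camuvid.py | create_dict_from_combinations
-- ===== SOURCE A (Python) =====
-- from itertools import combinations
--
-- def create_combinations(n, pair_size):
--     """
--     Generate all combinations of a specified size from a range of numbers.
--
--     Parameters:
--     n (int): The range of numbers to create combinations from (1 to n).
--     pair_size (int): The number of members in each pair.
--
--     Returns:
--     list: A list of tuples containing the combinations.
--     """
--     # Generate the range of numbers from 1 to n
--     # numbers = range(1, n + 1)
--
--     # Generate the combinations
--     combs = list(combinations(n, pair_size))
--
--     return combs
--
-- def create_dict_from_combinations(members_list, pair_size):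
--     """
--     Create a dictionary where the first element of each pair is the key
--     and the values are lists of combinations that start with that key.
--
--     Parameters:
--     members_list (list): The list of members to create combinations from.
--     pair_size (int): The number of members in each combination.
--
--     Returns:
--     dict: A dictionary with keys as the first element of each combination
--           and values as lists of combinations starting with that key.
--     """
--     # Generate the combinations
--     combs = create_combinations(members_list, pair_size)
--
--     # Create the dictionary
--     comb_dict = {}
--     for comb in combs:
--         key = comb[0]
--         if key not in comb_dict:
--             comb_dict[key] = []
--         comb_dict[key].append(comb)
--
--     return comb_dict
-- ===== SOURCE B (Python) =====
-- from itertools import combinations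
--
-- def create_dict_from_combinations(members_list, pair_size):
--     ml = list(members_list)
--     comb_dict = {}
--     for i, key in enumerate(ml):
--         group = [(key,) + rest for rest in combinations(ml[i + 1:], pair_size - 1)]
--         if group:
--             comb_dict.setdefault(key, []).extend(group)
--     return comb_dict
-- ===== Notes on version B (the rewrite author's own statement) =====
-- stated objective: alternative
-- what changed: A materializes the flat list of all k-combinations and updates the dict once per combination; B iterates over positions, builds each first-element group directly from (k-1)-combinations of the suffix, and does one setdefault/extend per group; Pre_ excludes pair_size <= 0, where A raises (IndexError for 0, ValueError for negatives).
-- crash fix: On an empty members_list with pair_size <= 0 A raises (IndexError for pair_size 0, ValueError for negative pair_size) while B returns the empty dict. — e.g. on create_dict_from_combinations([], 0): A raises IndexError, B returns []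
import Mathlib
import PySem

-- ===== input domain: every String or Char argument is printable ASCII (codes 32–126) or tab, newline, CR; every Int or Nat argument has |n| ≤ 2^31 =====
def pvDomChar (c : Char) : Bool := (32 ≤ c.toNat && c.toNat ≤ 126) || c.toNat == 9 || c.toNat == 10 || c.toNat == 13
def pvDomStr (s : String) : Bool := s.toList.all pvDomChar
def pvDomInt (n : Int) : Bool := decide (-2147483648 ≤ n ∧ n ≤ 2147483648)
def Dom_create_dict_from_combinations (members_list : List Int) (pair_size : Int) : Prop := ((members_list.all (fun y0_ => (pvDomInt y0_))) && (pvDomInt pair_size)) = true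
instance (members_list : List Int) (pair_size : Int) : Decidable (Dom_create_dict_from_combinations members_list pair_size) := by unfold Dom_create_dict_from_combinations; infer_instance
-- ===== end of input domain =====

-- B replaces A's flat combination list + per-combination dict updates by a per-position
-- loop that emits each first-element group whole from the suffix (objective: alternative).

-- ===== PORT A =====
-- itertools.combinations(xs, n) in positional (lexicographic-by-index) order
def pvCombs : Nat → List Int → List (List Int)
  | 0, _ => [[]]
  | _ + 1, [] => []
  | n + 1, x :: xs => (pvCombs n xs).map (fun t => x :: t) ++ pvCombs (n + 1) xs

-- loop body: key = comb[0]; if key not in d: d[key] = []; d[key].append(comb)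
-- (the [] branch is comb[0]'s IndexError, reachable only when pair_size ≤ 0, outside Pre_)
def pvAStep (d : PySem.Dict Int (List (List Int))) (comb : List Int) : PySem.Dict Int (List (List Int)) :=
  match comb with
  | [] => d
  | key :: _ =>
    let d := if (d.get? key).isNone then d.insert key ([] : List (List Int)) else d
    d.modify key [] (fun v => v ++ [comb])

def create_dict_from_combinations (members_list : List Int) (pair_size : Int) : List (Int × List (List Int)) :=
  let combs := pvCombs pair_size.toNat members_list
  (combs.foldl pvAStep PySem.Dict.empty).items

-- ===== PORT B =====
-- body of Source B's loop over enumerate(ml): group = [(key,)+rest for rest in combinations(ml[i+1:], pair_size-1)];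
-- if group: comb_dict.setdefault(key, []).extend(group)   (setdefault+in-place extend = modify with default [])
def pvBStep (ml : List Int) (pair_size : Int) (d : PySem.Dict Int (List (List Int))) (p : Int × Int) : PySem.Dict Int (List (List Int)) :=
  let group := (pvCombs (pair_size - 1).toNat (PySem.List.slice ml (some (p.1 + 1)) none)).map (fun rest => p.2 :: rest)
  if group ≠ [] then d.modify p.2 [] (fun v => v ++ group) else d

def create_dict_from_combinations_alt (members_list : List Int) (pair_size : Int) : List (Int × List (List Int)) :=
  ((PySem.List.enumerate members_list 0).foldl (pvBStep members_list pair_size) PySem.Dict.empty).items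

-- ===== PRECONDITION & SPEC =====
-- Pre_ excludes pair_size ≤ 0, where A raises (IndexError on comb[0] for pair_size == 0,
-- ValueError from itertools.combinations for pair_size < 0); A returns on everything else.
def Pre_create_dict_from_combinations (members_list : List Int) (pair_size : Int) : Prop := 1 ≤ pair_size
instance (members_list : List Int) (pair_size : Int) : Decidable (Pre_create_dict_from_combinations members_list pair_size) := by unfold Pre_create_dict_from_combinations; infer_instance

def pvWitness_create_dict_from_combinations : List Int × Int := ([1, 2, 3, 2], 2)

-- On an empty members_list with pair_size ≤ 0 A raises (IndexError for pair_size 0,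
-- ValueError for negative pair_size) while B returns the empty dict.
def Raises_create_dict_from_combinations (members_list : List Int) (pair_size : Int) : Prop := members_list = [] ∧ pair_size ≤ 0
instance (members_list : List Int) (pair_size : Int) : Decidable (Raises_create_dict_from_combinations members_list pair_size) := by unfold Raises_create_dict_from_combinations; infer_instance
def pvRaiseWitness_create_dict_from_combinations : List Int × Int := ([], 0)
def pvRaiseWitnessOut_create_dict_from_combinations : List (Int × List (List Int)) := []

def Spec_create_dict_from_combinations (members_list : List Int) (pair_size : Int) (out : List (Int × List (List Int))) : Prop := out = create_dict_from_combinations_alt members_list pair_size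
instance (members_list : List Int) (pair_size : Int) (out : List (Int × List (List Int))) : Decidable (Spec_create_dict_from_combinations members_list pair_size out) := by unfold Spec_create_dict_from_combinations; infer_instance

-- ===== CLAIM (what is proved, stated in full; the proofs are below) =====
def Claim_equal_create_dict_from_combinations : Prop := ∀ (members_list : List Int) (pair_size : Int), Dom_create_dict_from_combinations members_list pair_size → Pre_create_dict_from_combinations members_list pair_size → Spec_create_dict_from_combinations members_list pair_size (create_dict_from_combinations members_list pair_size)

def Claim_raises_create_dict_from_combinations : Prop := (∀ (members_list : List Int) (pair_size : Int), Dom_create_dict_from_combinations members_list pair_size → Raises_create_dict_from_combinations members_list pair_size → ¬ Pre_create_dict_from_combinations members_list pair_size) ∧ (Dom_create_dict_from_combinations (pvRaiseWitness_create_dict_from_combinations.1) (pvRaiseWitness_create_dict_from_combinations.2) ∧ Raises_create_dict_from_combinations (pvRaiseWitness_create_dict_from_combinations.1) (pvRaiseWitness_create_dict_from_combinations.2) ∧ create_dict_from_combinations_alt (pvRaiseWitness_create_dict_from_combinations.1) (pvRaiseWitness_create_dict_from_combinations.2) = pvRaiseWitnessOut_create_dict_from_combinations)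

-- ===== LEMMAS AND PROOFS =====

-- the combinations grouped by their first element, in order of first occurrence
def groupsOf (n : Nat) : List Int → List (Int × List (List Int))
  | [] => []
  | x :: xs =>
    (if pvCombs n xs = [] then [] else [(x, (pvCombs n xs).map (fun t => x :: t))]) ++ groupsOf n xs

def pvDictStep (d : PySem.Dict Int (List (List Int))) (kv : Int × List (List Int)) : PySem.Dict Int (List (List Int)) :=
  d.modify kv.1 [] (fun v => v ++ kv.2)

lemma pvCombs_succ_nil (n : Nat) : pvCombs (n + 1) [] = [] := rfl

lemma dict_modify_app_app (d : PySem.Dict Int (List (List Int))) (k : Int) (us vs : List (List Int)) :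
    (d.modify k [] (fun v => v ++ us)).modify k [] (fun v => v ++ vs)
      = d.modify k [] (fun v => v ++ (us ++ vs)) := by
  simp [PySem.Dict.modify, PySem.Dict.getD_insert_self, PySem.Dict.insert_insert_self,
    List.append_assoc]

lemma stepA_cons (d : PySem.Dict Int (List (List Int))) (k : Int) (t : List Int) :
    pvAStep d (k :: t) = d.modify k [] (fun v => v ++ [k :: t]) := by
  unfold pvAStep
  rcases h : d.get? k with _ | v
  · have hc : d.contains k = false := by
      rw [PySem.Dict.contains_eq_isSome_get?, h]; rfl
    simp [h, PySem.Dict.modify, PySem.Dict.getD_insert_self, PySem.Dict.insert_insert_self,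
      PySem.Dict.getD_of_not_contains, hc]
  · simp [h, PySem.Dict.modify]

lemma groupFold (k : Int) (t : List Int) (ts : List (List Int)) (d : PySem.Dict Int (List (List Int))) :
    ((t :: ts).map (fun u => k :: u)).foldl pvAStep d
      = d.modify k [] (fun v => v ++ (t :: ts).map (fun u => k :: u)) := by
  induction ts generalizing d t with
  | nil => simp [stepA_cons]
  | cons t' ts ih =>
    have : ((t :: t' :: ts).map (fun u => k :: u)).foldl pvAStep d
        = ((t' :: ts).map (fun u => k :: u)).foldl pvAStep (pvAStep d (k :: t)) := by
      simp [List.foldl_cons]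
    rw [this, ih, stepA_cons, dict_modify_app_app]
    simp

lemma mainFold (n : Nat) (xs : List Int) (d : PySem.Dict Int (List (List Int))) :
    (pvCombs (n + 1) xs).foldl pvAStep d = (groupsOf n xs).foldl pvDictStep d := by
  induction xs generalizing d with
  | nil => simp [pvCombs_succ_nil, groupsOf]
  | cons x xs ih =>
    have hA : pvCombs (n + 1) (x :: xs)
        = (pvCombs n xs).map (fun t => x :: t) ++ pvCombs (n + 1) xs := rfl
    rw [hA, List.foldl_append]
    cases hcs : pvCombs n xs with
    | nil => simp [groupsOf, hcs, ih]
    | cons t ts =>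
      rw [groupFold]
      simp only [groupsOf]
      rw [if_neg (by simp [hcs]), List.singleton_append, List.foldl_cons]
      simp only [hcs, pvDictStep]
      exact ih _

-- B's loop: enumerate indices starting at the length of the already-consumed prefix
lemma Bfold (m : Nat) (pre suf : List Int) (d : PySem.Dict Int (List (List Int))) :
    (PySem.List.enumerate suf (pre.length : Int)).foldl (pvBStep (pre ++ suf) ((m + 1 : Nat) : Int)) d
      = (groupsOf m suf).foldl pvDictStep d := by
  induction suf generalizing pre d with
  | nil => simp [PySem.List.enumerate_nil, groupsOf]
  | cons x xs ih =>
    rw [PySem.List.enumerate_cons, List.foldl_cons]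
    have hslice : PySem.List.slice (pre ++ x :: xs) (some ((pre.length : Int) + 1)) none = xs := by
      have : ((pre.length : Int) + 1) = ((pre.length + 1 : Nat) : Int) := by push_cast; ring
      rw [this, PySem.List.slice_from_natCast]
      simp
    have hidx : (((m + 1 : Nat) : Int) - 1).toNat = m := by omega
    have hstep : pvBStep (pre ++ x :: xs) ((m + 1 : Nat) : Int) d ((pre.length : Int), x)
        = if (pvCombs m xs).map (fun t => x :: t) ≠ [] then
            d.modify x [] (fun v => v ++ (pvCombs m xs).map (fun t => x :: t)) else d := by
      unfold pvBStep
      rw [hslice, hidx]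
    rw [hstep]
    have hrest : PySem.List.enumerate xs ((pre.length : Int) + 1)
        = PySem.List.enumerate xs (((pre ++ [x]).length : Nat) : Int) := by
      simp
    have happ : pre ++ x :: xs = (pre ++ [x]) ++ xs := by simp
    simp only [groupsOf]
    cases hcs : pvCombs m xs with
    | nil =>
      rw [hrest, happ, ih]
      simp
    | cons t ts =>
      rw [if_pos (by simp), if_neg (by simp), List.singleton_append, List.foldl_cons]
      rw [hrest, happ, ih]
      simp [pvDictStep]

-- ===== VERDICT (by name: the statement is the Claim_ definition above) =====
theorem create_dict_from_combinations_spec : Claim_equal_create_dict_from_combinations := by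
  intro ml ps _ hpre
  unfold Pre_create_dict_from_combinations at hpre
  unfold Spec_create_dict_from_combinations
  obtain ⟨m, hm⟩ : ∃ m, ps = ((m + 1 : Nat) : Int) := by
    refine ⟨ps.toNat - 1, ?_⟩
    omega
  subst hm
  unfold create_dict_from_combinations create_dict_from_combinations_alt
  simp only [Int.toNat_natCast]
  rw [mainFold]
  have h0 : (0 : Int) = ((([] : List Int).length : Nat) : Int) := by simp
  rw [h0, ← Bfold m [] ml]
  simp

@[simp]
theorem create_dict_from_combinations_raises : Claim_raises_create_dict_from_combinations := by
  unfold Claim_raises_create_dict_from_combinations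
  exact ⟨by intro ml ps _ hr; unfold Raises_create_dict_from_combinations at hr
            unfold Pre_create_dict_from_combinations; omega,
         by decide⟩
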